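-- pv_equiv track=rewrite | github.com/uiandwe/TIL | algorithm/backjoon/35.DFS/acmicpc3184/3184.py | findSheepWolf
-- ===== SOURCE A (Python) =====
-- def findSheepWolf(map):
--     sheep = 0
--     wolf = 0
--
--     for i in range(len(map)):
--         for j in range(len(map[i])):
--             if map[i][j] == "v":
--                 wolf += 1
--             if map[i][j] == "o":
--                 sheep += 1
--
--     return [sheep, wolf]
-- ===== SOURCE B (Python) =====
-- def findSheepWolf(map):
--     cells = [cell for row in map for cell in row]
--     return [cells.count("o"), cells.count("v")]
-- ===== Notes on version B (the rewrite author's own statement) =====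
-- stated objective: simpler
-- what changed: Replaces the single combined nested-index pass with two inline accumulators by flattening the grid once and making two dedicated library count scans, one per animal, with no manual counters.
import Mathlib
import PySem

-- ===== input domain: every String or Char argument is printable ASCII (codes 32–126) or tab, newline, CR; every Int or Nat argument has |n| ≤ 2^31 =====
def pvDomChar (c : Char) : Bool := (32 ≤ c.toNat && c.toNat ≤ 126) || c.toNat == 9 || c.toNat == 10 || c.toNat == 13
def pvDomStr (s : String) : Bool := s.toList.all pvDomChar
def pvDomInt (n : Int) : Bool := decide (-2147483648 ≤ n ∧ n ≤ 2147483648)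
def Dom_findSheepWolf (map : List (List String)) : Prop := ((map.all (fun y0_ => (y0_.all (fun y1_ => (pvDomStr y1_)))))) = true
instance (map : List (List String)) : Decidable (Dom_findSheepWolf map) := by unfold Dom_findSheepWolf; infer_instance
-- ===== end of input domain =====

-- B flattens the grid once and makes two dedicated library count scans (one per
-- animal) instead of A's single combined nested-index pass with two inline
-- accumulators (objective: simpler; same cost).

-- ===== PORT A =====
def findSheepWolf (map : List (List String)) : List Int :=
  let st : Int × Int :=
    (PySem.List.pyRange 0 (map.length : Int) 1).foldl (fun (st : Int × Int) i =>
      (PySem.List.pyRange 0 ((PySem.List.pyGetD map i []).length : Int) 1).foldl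
        (fun (st : Int × Int) j =>
          let cell := PySem.List.pyGetD (PySem.List.pyGetD map i []) j ""
          let st := if cell == "v" then (st.1, st.2 + 1) else st
          if cell == "o" then (st.1 + 1, st.2) else st)
        st) ((0 : Int), (0 : Int))
  [st.1, st.2]

-- ===== PORT B =====
def findSheepWolf_alt (map : List (List String)) : List Int :=
  let cells := map.flatMap (fun row => row)
  [PySem.List.count cells "o", PySem.List.count cells "v"]

-- ===== PRECONDITION & SPEC =====
def Spec_findSheepWolf (map : List (List String)) (out : List Int) : Prop := out = findSheepWolf_alt map
instance (map : List (List String)) (out : List Int) : Decidable (Spec_findSheepWolf map out) := by unfold Spec_findSheepWolf; infer_instance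

-- ===== CLAIM (what is proved, stated in full; the proofs are below) =====
def Claim_equal_findSheepWolf : Prop := ∀ (map : List (List String)), Dom_findSheepWolf map → Spec_findSheepWolf map (findSheepWolf map)

-- ===== LEMMAS AND PROOFS =====

-- one step of A's inner loop, over a cell
def pvStep (st : Int × Int) (cell : String) : Int × Int :=
  let st := if cell == "v" then (st.1, st.2 + 1) else st
  if cell == "o" then (st.1 + 1, st.2) else st

lemma pvStep_inner (row : List String) (st : Int × Int) :
    row.foldl pvStep st = (st.1 + row.count "o", st.2 + row.count "v") := by
  induction row generalizing st with
  | nil => simp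
  | cons c t ih =>
      simp only [List.foldl_cons, ih, List.count_cons]
      unfold pvStep
      by_cases hv : c = "v" <;> by_cases ho : c = "o" <;>
        simp_all [Prod.ext_iff] <;> omega

lemma pvStep_outer (m : List (List String)) (st : Int × Int) :
    m.foldl (fun st row => row.foldl pvStep st) st =
      (st.1 + (m.flatMap (fun row => row)).count "o",
       st.2 + (m.flatMap (fun row => row)).count "v") := by
  induction m generalizing st with
  | nil => simp
  | cons r t ih =>
      rw [List.foldl_cons, pvStep_inner, ih]
      simp only [List.flatMap_cons, List.count_append, Prod.ext_iff]
      constructor <;> push_cast <;> ring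

lemma findSheepWolf_eq_pvStep (m : List (List String)) :
    findSheepWolf m =
      (let st : Int × Int :=
        (PySem.List.pyRange 0 (m.length : Int) 1).foldl (fun (st : Int × Int) i =>
          (PySem.List.pyRange 0 ((PySem.List.pyGetD m i []).length : Int) 1).foldl
            (fun st j => pvStep st (PySem.List.pyGetD (PySem.List.pyGetD m i []) j ""))
            st) ((0 : Int), (0 : Int))
       [st.1, st.2]) := rfl

-- ===== VERDICT (by name: the statement is the Claim_ definition above) =====
theorem findSheepWolf_spec : Claim_equal_findSheepWolf := by
  intro m _
  show findSheepWolf m = findSheepWolf_alt m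
  rw [findSheepWolf_eq_pvStep]
  unfold findSheepWolf_alt
  simp only [PySem.List.count_eq]
  rw [PySem.List.foldl_pyRange_zero_pyGetD' m []
      (fun st row => (PySem.List.pyRange 0 (row.length : Int) 1).foldl
        (fun st j => pvStep st (PySem.List.pyGetD row j "")) st) ((0:Int),(0:Int))]
  have : ∀ st, m.foldl (fun st row =>
      (PySem.List.pyRange 0 (row.length : Int) 1).foldl
        (fun st j => pvStep st (PySem.List.pyGetD row j "")) st) st =
      m.foldl (fun st row => row.foldl pvStep st) st := by
    intro st
    exact PySem.List.foldl_congr_mem m _ _ st (fun st row _ =>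
      PySem.List.foldl_pyRange_zero_pyGetD' row "" pvStep st)
  rw [this, pvStep_outer]
  simp
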